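-- pv_equiv track=rewrite | github.com/impavidox/Vpn-series | Get Data/addinfowatchproviders.py | aggregate_provider_counts
-- ===== SOURCE A (Python) =====
-- countries_of_interest = [
--     "US",  # United States
--     "CN",  # China
--     "IN",  # India
--     "JP",  # Japan
--     "DE",  # Germany
--     "GB",  # United Kingdom
--     "FR",  # France
--     "BR",  # Brazil
--     "CA",  # Canada
--     "AU",  # Australia
--     "RU",  # Russia
--     "IT",  # Italy
--     "ES",  # Spain
--     "SE",  # Sweden
--     "NL",  # Netherlands
--     "CH",  # Switzerland
--     "PL",  # Poland
--     "BE",  # Belgium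
--     "AT",  # Austria
--     "DK",  # Denmark
--     "FI",  # Finland
--     "NO",  # Norway
--     "IE",  # Ireland
--     "PT",  # Portugal
--     "GR",  # Greece
--     "CZ",  # Czech Republic
--     "HU",  # Hungary
--     "SK",  # Slovakia
--     "RO",  # Romania
--     "BG",  # Bulgaria
--     "TR",  # Turkey
--     "SA",  # Saudi Arabia
--     "AR",  # Argentina
--     "MX",  # Mexico
--     "KR",  # South Korea
--     "ID",  # Indonesia
--     "VN"   # Vietnam
-- ]
--
-- def aggregate_provider_counts(season_results):
--     """
--     Aggregate provider counts across all seasons while keeping country-wise division.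
--
--     Args:
--         season_results (list of dict): List of provider data from each season.
--
--     Returns:
--         dict: Aggregated counts of providers by country.
--     """
--     aggregated_data = {country: {} for country in countries_of_interest}
--
--     for result in season_results:
--         for country, providers in result.items():
--             if country not in aggregated_data:
--                 continue
--             for provider_name, count in providers.items():
--                 if provider_name not in aggregated_data[country]:
--                     aggregated_data[country][provider_name] = 0
--                 aggregated_data[country][provider_name] += count  # Increment count for this provider
--
--     return aggregated_data
-- ===== SOURCE B (Python) =====
-- countries_of_interest = [
--     "US", "CN", "IN", "JP", "DE", "GB", "FR", "BR", "CA", "AU",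
--     "RU", "IT", "ES", "SE", "NL", "CH", "PL", "BE", "AT", "DK",
--     "FI", "NO", "IE", "PT", "GR", "CZ", "HU", "SK", "RO", "BG",
--     "TR", "SA", "AR", "MX", "KR", "ID", "VN"
-- ]
--
-- def aggregate_provider_counts(season_results):
--     aggregated_data = {}
--     for country in countries_of_interest:
--         totals = {}
--         for result in season_results:
--             if country in result:
--                 for provider, count in result[country].items():
--                     totals[provider] = totals.get(provider, 0) + count
--         aggregated_data[country] = totals
--     return aggregated_data
-- ===== Notes on version B (the rewrite author's own statement) =====
-- stated objective: alternative
-- what changed: Inverts the loop nesting: instead of one dict-of-dicts state updated season-major (with membership/initialize-to-zero bookkeeping per provider), B loops country-major, building each country's provider totals independently with a plain get-based accumulation, so the shared mutable nested state disappears.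
import Mathlib
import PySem

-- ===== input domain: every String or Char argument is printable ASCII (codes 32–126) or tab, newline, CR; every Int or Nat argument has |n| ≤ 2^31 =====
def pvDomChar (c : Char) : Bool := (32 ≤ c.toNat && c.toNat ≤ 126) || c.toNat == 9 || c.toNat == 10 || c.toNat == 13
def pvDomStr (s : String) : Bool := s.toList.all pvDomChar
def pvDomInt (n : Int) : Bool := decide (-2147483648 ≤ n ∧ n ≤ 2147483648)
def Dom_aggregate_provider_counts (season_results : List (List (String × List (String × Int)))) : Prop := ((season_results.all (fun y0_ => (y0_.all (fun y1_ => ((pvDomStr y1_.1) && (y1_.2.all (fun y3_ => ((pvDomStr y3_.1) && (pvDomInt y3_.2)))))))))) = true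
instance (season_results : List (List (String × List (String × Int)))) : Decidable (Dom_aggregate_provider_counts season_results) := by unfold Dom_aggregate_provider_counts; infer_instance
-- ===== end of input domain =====

-- B inverts A's loop nesting (country-major instead of season-major); same cost class, no speed claim.
-- ===== PORT A =====
def countries_of_interest : List String :=
  ["US", "CN", "IN", "JP", "DE", "GB", "FR", "BR", "CA", "AU",
   "RU", "IT", "ES", "SE", "NL", "CH", "PL", "BE", "AT", "DK",
   "FI", "NO", "IE", "PT", "GR", "CZ", "HU", "SK", "RO", "BG",
   "TR", "SA", "AR", "MX", "KR", "ID", "VN"]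

-- 'if provider_name not in aggregated_data[country]: aggregated_data[country][provider_name] = 0'
-- then 'aggregated_data[country][provider_name] += count'
def pvAInner (agg : PySem.Dict String (PySem.Dict String Int)) (country : String)
    (pc : String × Int) : PySem.Dict String (PySem.Dict String Int) :=
  let agg1 := if (agg.getD country PySem.Dict.empty).contains pc.1 then agg
              else agg.modify country PySem.Dict.empty (fun m => m.insert pc.1 (0 : Int))
  agg1.modify country PySem.Dict.empty (fun m => m.insert pc.1 (m.getD pc.1 0 + pc.2))

-- one (country, providers) item of a season's dict: skipped if country not in aggregated_data
def pvAEntry (agg : PySem.Dict String (PySem.Dict String Int))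
    (e : String × List (String × Int)) : PySem.Dict String (PySem.Dict String Int) :=
  if agg.contains e.1 then e.2.foldl (fun a pc => pvAInner a e.1 pc) agg else agg

def aggregate_provider_counts (season_results : List (List (String × List (String × Int)))) :
    List (String × List (String × Int)) :=
  let agg0 := countries_of_interest.foldl
    (fun d c => d.insert c (PySem.Dict.empty : PySem.Dict String Int)) PySem.Dict.empty
  let agg := season_results.foldl (fun a result => result.foldl pvAEntry a) agg0
  agg.items.map (fun p => (p.1, p.2.items))

-- ===== PORT B =====
-- 'totals[provider] = totals.get(provider, 0) + count'
def pvBAdd (t : PySem.Dict String Int) (pc : String × Int) : PySem.Dict String Int :=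
  t.insert pc.1 (t.getD pc.1 0 + pc.2)

-- 'if country in result: for provider, count in result[country].items(): …'
def pvBSeason (c : String) (t : PySem.Dict String Int)
    (result : List (String × List (String × Int))) : PySem.Dict String Int :=
  match (PySem.Dict.mk result).get? c with
  | some pv => pv.foldl pvBAdd t
  | none => t

def aggregate_provider_counts_alt (season_results : List (List (String × List (String × Int)))) :
    List (String × List (String × Int)) :=
  countries_of_interest.map
    (fun c => (c, (season_results.foldl (pvBSeason c) PySem.Dict.empty).items))

-- ===== PRECONDITION & SPEC =====
-- Pre_ requires each season's association list to have distinct country keys: this is the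
-- representation invariant of a Python dict (every real dict input satisfies it); on duplicate
-- keys A's item iteration and B's first-match lookup would diverge, a corner no dict reaches.
def Pre_aggregate_provider_counts (season_results : List (List (String × List (String × Int)))) : Prop :=
  ∀ r ∈ season_results, (r.map Prod.fst).Nodup
instance (season_results : List (List (String × List (String × Int)))) : Decidable (Pre_aggregate_provider_counts season_results) := by unfold Pre_aggregate_provider_counts; infer_instance

def pvWitness_aggregate_provider_counts : (List (List (String × List (String × Int)))) :=
  [[("US", [("netflix", 2), ("hulu", 0)]), ("FR", [("canal", 1)])],
   [("US", [("netflix", 3)]), ("XX", [("foo", 7)])]]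

def Spec_aggregate_provider_counts (season_results : List (List (String × List (String × Int)))) (out : List (String × List (String × Int))) : Prop := out = aggregate_provider_counts_alt season_results
instance (season_results : List (List (String × List (String × Int)))) (out : List (String × List (String × Int))) : Decidable (Spec_aggregate_provider_counts season_results out) := by unfold Spec_aggregate_provider_counts; infer_instance

-- ===== CLAIM (what is proved, stated in full; the proofs are below) =====
def Claim_equal_aggregate_provider_counts : Prop := ∀ (season_results : List (List (String × List (String × Int)))), Dom_aggregate_provider_counts season_results → Pre_aggregate_provider_counts season_results → Spec_aggregate_provider_counts season_results (aggregate_provider_counts season_results)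

-- ===== LEMMAS AND PROOFS =====

-- A's two-step provider update collapses to one insert of the merged inner dict.
theorem pvAInner_eq (agg : PySem.Dict String (PySem.Dict String Int)) (c : String)
    (pc : String × Int) :
    pvAInner agg c pc = agg.insert c (pvBAdd (agg.getD c PySem.Dict.empty) pc) := by
  unfold pvAInner pvBAdd
  by_cases h : (agg.getD c PySem.Dict.empty).contains pc.1 = true
  · simp [h, PySem.Dict.modify]
  · simp only [Bool.not_eq_true] at h
    simp [h, PySem.Dict.modify, PySem.Dict.getD_insert_self,
      PySem.Dict.insert_insert_self, PySem.Dict.getD_of_not_contains _ _ h]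

theorem pvInnerFold_getD_ne (pcs : List (String × Int))
    (agg : PySem.Dict String (PySem.Dict String Int)) (c c' : String) (h : c' ≠ c) :
    (pcs.foldl (fun a pc => pvAInner a c pc) agg).getD c' PySem.Dict.empty
      = agg.getD c' PySem.Dict.empty := by
  induction pcs generalizing agg with
  | nil => rfl
  | cons pc rest ih =>
    rw [List.foldl_cons, pvAInner_eq, ih, PySem.Dict.getD_insert_of_ne _ _ _ h]

theorem pvInnerFold_getD_self (pcs : List (String × Int))
    (agg : PySem.Dict String (PySem.Dict String Int)) (c : String) :
    (pcs.foldl (fun a pc => pvAInner a c pc) agg).getD c PySem.Dict.empty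
      = pcs.foldl pvBAdd (agg.getD c PySem.Dict.empty) := by
  induction pcs generalizing agg with
  | nil => rfl
  | cons pc rest ih =>
    rw [List.foldl_cons, pvAInner_eq, ih, PySem.Dict.getD_insert_self, List.foldl_cons]

theorem pvInnerFold_keys (pcs : List (String × Int))
    (agg : PySem.Dict String (PySem.Dict String Int)) (c : String)
    (h : agg.contains c = true) :
    (pcs.foldl (fun a pc => pvAInner a c pc) agg).keys = agg.keys := by
  induction pcs generalizing agg with
  | nil => rfl
  | cons pc rest ih =>
    rw [List.foldl_cons, pvAInner_eq,
      ih _ (by simp),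
      PySem.Dict.keys_insert_of_contains _ _ h]

theorem pvSeason_keys (es : List (String × List (String × Int)))
    (agg : PySem.Dict String (PySem.Dict String Int)) :
    (es.foldl pvAEntry agg).keys = agg.keys := by
  induction es generalizing agg with
  | nil => rfl
  | cons e rest ih =>
    simp only [List.foldl_cons, pvAEntry]
    by_cases h : agg.contains e.1 = true
    · rw [if_pos h, ih, pvInnerFold_keys _ _ _ h]
    · rw [if_neg h, ih]

theorem pvSeason_getD (es : List (String × List (String × Int)))
    (agg : PySem.Dict String (PySem.Dict String Int)) (c : String)
    (hc : agg.contains c = true) :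
    (es.foldl pvAEntry agg).getD c PySem.Dict.empty
      = ((es.filter (fun e => e.1 == c)).flatMap (fun e => e.2)).foldl pvBAdd
          (agg.getD c PySem.Dict.empty) := by
  induction es generalizing agg with
  | nil => rfl
  | cons e rest ih =>
    simp only [List.foldl_cons, pvAEntry]
    by_cases he : e.1 = c
    · subst he
      rw [if_pos hc]
      have hc' : ((e.2.foldl (fun a pc => pvAInner a e.1 pc) agg)).contains e.1 = true := by
        rw [PySem.Dict.contains_iff_mem_keys, pvInnerFold_keys _ _ _ hc,
          ← PySem.Dict.contains_iff_mem_keys]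
        exact hc
      rw [ih _ hc', pvInnerFold_getD_self]
      simp [List.foldl_append]
    · have hne : (e.1 == c) = false := by simp [he]
      by_cases h : agg.contains e.1 = true
      · have hc' : ((e.2.foldl (fun a pc => pvAInner a e.1 pc) agg)).contains c = true := by
          rw [PySem.Dict.contains_iff_mem_keys, pvInnerFold_keys _ _ _ h,
            ← PySem.Dict.contains_iff_mem_keys]
          exact hc
        rw [if_pos h, ih _ hc', pvInnerFold_getD_ne _ _ _ _ (by exact fun hcc => he hcc.symm)]
        simp [hne]
      · rw [if_neg h, ih _ hc]
        simp [hne]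

theorem pvTotal_getD (sr : List (List (String × List (String × Int))))
    (agg : PySem.Dict String (PySem.Dict String Int)) (c : String)
    (hc : agg.contains c = true) :
    (sr.foldl (fun a r => r.foldl pvAEntry a) agg).getD c PySem.Dict.empty
      = (sr.flatMap (fun r => (r.filter (fun e => e.1 == c)).flatMap (fun e => e.2))).foldl
          pvBAdd (agg.getD c PySem.Dict.empty) := by
  induction sr generalizing agg with
  | nil => rfl
  | cons r rest ih =>
    simp only [List.foldl_cons, List.flatMap_cons]
    have hc' : (r.foldl pvAEntry agg).contains c = true := by
      rw [PySem.Dict.contains_iff_mem_keys, pvSeason_keys,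
        ← PySem.Dict.contains_iff_mem_keys]
      exact hc
    rw [ih _ hc', pvSeason_getD _ _ _ hc, List.foldl_append]

theorem pvTotal_keys (sr : List (List (String × List (String × Int))))
    (agg : PySem.Dict String (PySem.Dict String Int)) :
    (sr.foldl (fun a r => r.foldl pvAEntry a) agg).keys = agg.keys := by
  induction sr generalizing agg with
  | nil => rfl
  | cons r rest ih => rw [List.foldl_cons, ih, pvSeason_keys]

theorem pvFilter_nil_of_not_mem (r : List (String × List (String × Int))) (c : String)
    (h : c ∉ r.map Prod.fst) : r.filter (fun e => e.1 == c) = [] := by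
  rw [List.filter_eq_nil_iff]
  intro e he hec
  exact h (List.mem_map.mpr ⟨e, he, by simpa using hec.symm⟩)

theorem pvBSeason_eq (r : List (String × List (String × Int))) (c : String)
    (t : PySem.Dict String Int) (hnd : (r.map Prod.fst).Nodup) :
    pvBSeason c t r = ((r.filter (fun e => e.1 == c)).flatMap (fun e => e.2)).foldl pvBAdd t := by
  induction r generalizing t with
  | nil => rfl
  | cons e rest ih =>
    obtain ⟨k, pv⟩ := e
    simp only [List.map_cons, List.nodup_cons] at hnd
    by_cases he : k = c
    · have hfil : rest.filter (fun e => e.1 == c) = [] :=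
        pvFilter_nil_of_not_mem _ _ (he ▸ hnd.1)
      simp [pvBSeason, PySem.Dict.get?_mk_cons, he, hfil]
    · have hrec := ih t hnd.2
      have hk : (k == c) = false := by simp [he]
      simp only [List.filter_cons, hk, Bool.false_eq_true, if_false]
      rw [← hrec]
      simp [pvBSeason, PySem.Dict.get?_mk_cons, hk]

theorem pvBTotal_eq (sr : List (List (String × List (String × Int)))) (c : String)
    (t : PySem.Dict String Int) (hnd : ∀ r ∈ sr, (r.map Prod.fst).Nodup) :
    sr.foldl (pvBSeason c) t
      = (sr.flatMap (fun r => (r.filter (fun e => e.1 == c)).flatMap (fun e => e.2))).foldl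
          pvBAdd t := by
  induction sr generalizing t with
  | nil => rfl
  | cons r rest ih =>
    simp only [List.foldl_cons, List.flatMap_cons]
    rw [pvBSeason_eq _ _ _ (hnd r (by simp)), List.foldl_append,
      ih _ (fun r hr => hnd r (by simp [hr]))]

theorem pvAgg0_getD (l : List String) (d : PySem.Dict String (PySem.Dict String Int))
    (h : ∀ c, d.getD c PySem.Dict.empty = PySem.Dict.empty) (c : String) :
    (l.foldl (fun d c' => d.insert c' (PySem.Dict.empty : PySem.Dict String Int)) d).getD c
      PySem.Dict.empty = PySem.Dict.empty := by
  induction l generalizing d with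
  | nil => exact h c
  | cons x rest ih =>
    rw [List.foldl_cons]
    refine ih _ (fun c' => ?_) 
    rw [PySem.Dict.getD_insert]
    split <;> simp [h]

set_option maxRecDepth 8000 in
-- ===== VERDICT (by name: the statement is the Claim_ definition above) =====
theorem aggregate_provider_counts_spec : Claim_equal_aggregate_provider_counts := by
  intro sr _hdom hpre
  unfold Spec_aggregate_provider_counts aggregate_provider_counts aggregate_provider_counts_alt
  dsimp only
  have hkeys : (sr.foldl (fun a r => r.foldl pvAEntry a)
      (countries_of_interest.foldl (fun d c => d.insert c (PySem.Dict.empty : PySem.Dict String Int)) PySem.Dict.empty)).keys = countries_of_interest := by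
    rw [pvTotal_keys]; decide
  rw [PySem.Dict.items_eq_map_keys _ (by rw [hkeys]; decide) PySem.Dict.empty, hkeys,
    List.map_map]
  refine List.map_congr_left (fun c hc => ?_)
  have hc0 : (countries_of_interest.foldl (fun d c => d.insert c (PySem.Dict.empty : PySem.Dict String Int)) PySem.Dict.empty).contains c = true := by
    rw [PySem.Dict.contains_iff_mem_keys]
    have : (countries_of_interest.foldl (fun d c => d.insert c (PySem.Dict.empty : PySem.Dict String Int)) PySem.Dict.empty).keys = countries_of_interest := by decide
    rw [this]; exact hc
  simp only [Function.comp]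
  rw [pvTotal_getD _ _ _ hc0, pvAgg0_getD _ _ (fun c' => by simp [PySem.Dict.getD_empty]) c,
    pvBTotal_eq _ _ _ hpre]
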